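-- pv_equiv track=rewrite | github.com/WooniCode/thisIsCodingTest | 4_Implementation/programmers/모의고사.py | solution
-- ===== SOURCE A (Python) =====
-- def solution(answers):
--     answer = []
--
--     person1 = [1, 2, 3, 4, 5]
--     person2 = [2, 1, 2, 3, 2, 4, 2, 5]
--     person3 = [3, 3, 1, 1, 2, 2, 4, 4, 5, 5]
--
--     score1, score2, score3 = 0, 0, 0
--
--     for i in range(len(answers)):
--         if person1[i % 5] == answers[i]:
--             score1 += 1
--         if person2[i % 8] == answers[i]:
--             score2 += 1
--         if person3[i % 10] == answers[i]:
--             score3 += 1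
--
--     maxVal = max(score1, score2, score3)
--     if score1 == maxVal:
--         answer.append(1)
--     if score2 == maxVal:
--         answer.append(2)
--     if score3 == maxVal:
--         answer.append(3)
--
--     return answer
-- ===== SOURCE B (Python) =====
-- def solution(answers):
--     # Count answers by residue class: since 5, 8, 10 all divide 40, position i
--     # contributes to pattern p exactly when p[(i % 40) % len(p)] == answers[i],
--     # so one counter keyed by (i % 40, value) determines all three scores.
--     counts = {}
--     for i, a in enumerate(answers):
--         key = (i % 40, a)
--         counts[key] = counts.get(key, 0) + 1
--     patterns = [[1, 2, 3, 4, 5],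
--                 [2, 1, 2, 3, 2, 4, 2, 5],
--                 [3, 3, 1, 1, 2, 2, 4, 4, 5, 5]]
--     scores = [sum(c for (r, v), c in counts.items() if p[r % len(p)] == v)
--               for p in patterns]
--     best = max(scores)
--     return [k + 1 for k, s in enumerate(scores) if s == best]
-- ===== Notes on version B (the rewrite author's own statement) =====
-- stated objective: alternative
-- what changed: B replaces A's per-position simultaneous three-counter loop by a counting dictionary keyed by (i % 40, answer) (40 = lcm of the pattern lengths) built in one pass, from which each pattern's score is aggregated over at most 200 distinct counter entries, independent of which positions produced them.
import Mathlib
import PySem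

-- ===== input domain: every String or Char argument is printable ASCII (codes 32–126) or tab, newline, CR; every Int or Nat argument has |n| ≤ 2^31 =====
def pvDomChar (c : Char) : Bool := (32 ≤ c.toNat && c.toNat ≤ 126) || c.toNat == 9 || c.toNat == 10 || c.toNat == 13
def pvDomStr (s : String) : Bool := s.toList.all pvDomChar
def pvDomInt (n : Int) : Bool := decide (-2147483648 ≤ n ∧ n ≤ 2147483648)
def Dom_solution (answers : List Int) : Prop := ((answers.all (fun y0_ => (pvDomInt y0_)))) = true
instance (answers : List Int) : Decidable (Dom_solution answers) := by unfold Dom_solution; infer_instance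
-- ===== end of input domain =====

-- B counts answers into a dictionary keyed by (i % 40, value) — 40 = lcm(5, 8, 10) — in one pass,
-- then computes each pattern's score by aggregating the counter entries (objective: alternative).

-- ===== PORT A =====
def solution (answers : List Int) : List Int :=
  let person1 : List Int := [1, 2, 3, 4, 5]
  let person2 : List Int := [2, 1, 2, 3, 2, 4, 2, 5]
  let person3 : List Int := [3, 3, 1, 1, 2, 2, 4, 4, 5, 5]
  -- for i in range(len(answers)): three if-counters; every index is in range, so pyGetD is exact
  let s := (PySem.List.pyRange 0 (answers.length : Int) 1).foldl
    (fun (st : Int × Int × Int) i =>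
      (if PySem.List.pyGetD person1 (PySem.Int.mod i 5) 0 = PySem.List.pyGetD answers i 0 then st.1 + 1 else st.1,
       if PySem.List.pyGetD person2 (PySem.Int.mod i 8) 0 = PySem.List.pyGetD answers i 0 then st.2.1 + 1 else st.2.1,
       if PySem.List.pyGetD person3 (PySem.Int.mod i 10) 0 = PySem.List.pyGetD answers i 0 then st.2.2 + 1 else st.2.2))
    (0, 0, 0)
  let maxVal := max (max s.1 s.2.1) s.2.2
  let answer : List Int := []
  let answer := if s.1 = maxVal then answer ++ [1] else answer
  let answer := if s.2.1 = maxVal then answer ++ [2] else answer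
  let answer := if s.2.2 = maxVal then answer ++ [3] else answer
  answer

-- ===== PORT B =====
def solution_alt (answers : List Int) : List Int :=
  -- counts[(i % 40, a)] += 1 over enumerate(answers)
  let counts := (PySem.List.enumerate answers 0).foldl
    (fun (d : PySem.Dict (Int × Int) Int) ia =>
      d.insert (PySem.Int.mod ia.1 40, ia.2) (d.getD (PySem.Int.mod ia.1 40, ia.2) 0 + 1))
    PySem.Dict.empty
  let patterns : List (List Int) :=
    [[1, 2, 3, 4, 5], [2, 1, 2, 3, 2, 4, 2, 5], [3, 3, 1, 1, 2, 2, 4, 4, 5, 5]]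
  -- sum(c for (r, v), c in counts.items() if p[r % len(p)] == v); r % len(p) is always in range
  let scores := patterns.map (fun p =>
    ((counts.items.filter (fun kc =>
        decide (PySem.List.pyGetD p (PySem.Int.mod kc.1.1 (p.length : Int)) 0 = kc.1.2))).map
      (fun kc => kc.2)).sum)
  -- max(scores): scores always has three elements, so max? is never none
  let best := (PySem.List.max? scores (fun y => y)).getD 0
  (PySem.List.enumerate scores 0).foldl
    (fun acc ks => if ks.2 = best then acc ++ [ks.1 + 1] else acc) []

-- ===== PRECONDITION & SPEC =====
def Spec_solution (answers : List Int) (out : List Int) : Prop := out = solution_alt answers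
instance (answers : List Int) (out : List Int) : Decidable (Spec_solution answers out) := by unfold Spec_solution; infer_instance

-- ===== CLAIM =====
def Claim_equal_solution : Prop := ∀ (answers : List Int), Dom_solution answers → Spec_solution answers (solution answers)

-- ===== LEMMAS AND PROOFS =====

-- sum over a nodup list of indicator of one member is 1
theorem sum_indicator_one {α : Type} [DecidableEq α] (l : List α) (hl : l.Nodup) (x : α) (hx : x ∈ l) :
    (l.map (fun k => if k = x then (1 : Int) else 0)).sum = 1 := by
  induction l with
  | nil => cases hx
  | cons a l ih =>
    by_cases hax : a = x
    · subst hax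
      have hzero : (l.map (fun k => if k = a then (1 : Int) else 0)).sum = 0 := by
        apply List.sum_eq_zero
        intro y hy
        rcases List.mem_map.mp hy with ⟨k, hk, rfl⟩
        have hne : k ≠ a := fun he => (List.nodup_cons.mp hl).1 (he ▸ hk)
        simp [hne]
      simp [hzero]
    · have hx' : x ∈ l := by
        rcases List.mem_cons.mp hx with h | h
        · exact absurd h.symm hax
        · exact h
      simp [hax, ih (List.nodup_cons.mp hl).2 hx']

-- sum of multiplicities over a nodup superset of the support is the length
theorem sum_counts {α : Type} [BEq α] [LawfulBEq α] [DecidableEq α] (m : List α) : ∀ (l : List α), l.Nodup →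
    (∀ a ∈ m, a ∈ l) → (l.map (fun k => ((m.count k : Nat) : Int))).sum = (m.length : Int) := by
  induction m with
  | nil => intro l _ _; simp
  | cons x m ih =>
    intro l hl hsub
    have hx : x ∈ l := hsub x (List.mem_cons_self)
    have hfe : (fun k => ((List.count k (x :: m) : Nat) : Int))
        = fun k => ((List.count k m : Nat) : Int) + (if k = x then (1 : Int) else 0) := by
      funext k
      by_cases h : k = x
      · simp [h]
      · simp [h, Ne.symm h]
    rw [hfe, PySem.List.sum_map_add_int, ih l hl (fun a ha => hsub a (List.mem_cons_of_mem _ ha)),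
        sum_indicator_one l hl x hx]
    push_cast [List.length_cons]
    ring

-- a weighted sum over the counter's items is a countP over the counted list
theorem counter_weighted_sum {α : Type} [BEq α] [LawfulBEq α] [DecidableEq α] (ks : List α) (Q : α → Bool) :
    ((((PySem.Dict.counter ks (κ := α)).items.filter (fun kc => Q kc.1)).map (fun kc => kc.2)).sum)
      = ((ks.countP Q : Nat) : Int) := by
  rw [PySem.Dict.items_counter, List.filter_map, List.map_map]
  have hfm : (PySem.Set.ofList ks).filter ((fun kc : α × Int => Q kc.1) ∘ fun k => (k, (ks.count k : Int)))
      = (PySem.Set.ofList ks).filter Q := by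
    apply List.filter_congr; intro a _; rfl
  rw [hfm]
  have hsum : (((PySem.Set.ofList ks).filter Q).map
      ((fun kc : α × Int => kc.2) ∘ fun k => (k, (ks.count k : Int)))).sum
      = (((PySem.Set.ofList ks).filter Q).map (fun k => ((ks.count k : Nat) : Int))).sum := rfl
  rw [hsum]
  have hcnt : ∀ a ∈ (PySem.Set.ofList ks).filter Q, ((ks.count a : Nat) : Int) = (((ks.filter Q).count a : Nat) : Int) := by
    intro a ha
    rw [List.count_filter (List.of_mem_filter ha)]
  rw [List.map_congr_left hcnt, List.countP_eq_length_filter]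
  exact sum_counts (ks.filter Q) ((PySem.Set.ofList ks).filter Q)
      ((PySem.Set.nodup_ofList ks).filter _)
      (fun a ha => List.mem_filter.mpr
        ⟨(PySem.Set.mem_ofList ks a).mpr (List.mem_of_mem_filter ha), List.of_mem_filter ha⟩)

-- an insert-getD+1 loop over keys computed by a function is the counter of the mapped list
theorem foldl_key_counter {α κ : Type} [BEq κ] (l : List α) (key : α → κ) :
    l.foldl (fun (d : PySem.Dict κ Int) x => d.insert (key x) (d.getD (key x) 0 + 1)) PySem.Dict.empty
      = PySem.Dict.counter (l.map key) := by
  rw [← PySem.Dict.foldl_insert_getD_add_one_eq_counter, List.foldl_map]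

-- B's counter-aggregated score for pattern p equals a countP over range(len(answers))
theorem scoreB_eq (answers : List Int) (p : List Int) (m : Int)
    (hm : (p.length : Int) = m) (hpos : 0 < m) (hdvd : m ∣ 40) :
    ((((PySem.List.enumerate answers 0).foldl
        (fun (d : PySem.Dict (Int × Int) Int) ia =>
          d.insert (PySem.Int.mod ia.1 40, ia.2) (d.getD (PySem.Int.mod ia.1 40, ia.2) 0 + 1))
        PySem.Dict.empty).items.filter (fun kc =>
          decide (PySem.List.pyGetD p (PySem.Int.mod kc.1.1 (p.length : Int)) 0 = kc.1.2))).map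
      (fun kc => kc.2)).sum
    = (((PySem.List.pyRange 0 (answers.length : Int) 1).countP
        (fun i => decide (PySem.List.pyGetD p (PySem.Int.mod i m) 0 = PySem.List.pyGetD answers i 0)) : Nat) : Int) := by
  subst hm
  rw [foldl_key_counter (PySem.List.enumerate answers 0) (fun ia => (PySem.Int.mod ia.1 40, ia.2))]
  refine (counter_weighted_sum ((PySem.List.enumerate answers 0).map (fun ia => (PySem.Int.mod ia.1 40, ia.2)))
      (fun k : Int × Int => decide (PySem.List.pyGetD p (PySem.Int.mod k.1 (p.length : Int)) 0 = k.2))).trans ?_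
  congr 1
  rw [List.countP_map, PySem.List.enumerate_eq_map_pyRange answers (0 : Int), List.countP_map]
  apply List.countP_congr
  intro i hi
  have hmod : PySem.Int.mod (PySem.Int.mod i 40) (p.length : Int) = PySem.Int.mod i (p.length : Int) := by
    rw [PySem.Int.mod_eq_emod_of_pos (by norm_num : (0:Int) < 40),
        PySem.Int.mod_eq_emod_of_pos hpos, PySem.Int.mod_eq_emod_of_pos hpos,
        Int.emod_emod_of_dvd i hdvd]
  simp only [Function.comp, hmod]

-- A's simultaneous three-counter loop computes the three countP scores
theorem loopA (answers : List Int) :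
    (PySem.List.pyRange 0 (answers.length : Int) 1).foldl
      (fun (st : Int × Int × Int) i =>
        (if PySem.List.pyGetD [1,2,3,4,5] (PySem.Int.mod i 5) 0 = PySem.List.pyGetD answers i 0 then st.1 + 1 else st.1,
         if PySem.List.pyGetD [2,1,2,3,2,4,2,5] (PySem.Int.mod i 8) 0 = PySem.List.pyGetD answers i 0 then st.2.1 + 1 else st.2.1,
         if PySem.List.pyGetD [3,3,1,1,2,2,4,4,5,5] (PySem.Int.mod i 10) 0 = PySem.List.pyGetD answers i 0 then st.2.2 + 1 else st.2.2))
      (0, 0, 0)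
    = ((((PySem.List.pyRange 0 (answers.length : Int) 1).countP
          (fun i => decide (PySem.List.pyGetD [1,2,3,4,5] (PySem.Int.mod i 5) 0 = PySem.List.pyGetD answers i 0)) : Nat) : Int),
       (((PySem.List.pyRange 0 (answers.length : Int) 1).countP
          (fun i => decide (PySem.List.pyGetD [2,1,2,3,2,4,2,5] (PySem.Int.mod i 8) 0 = PySem.List.pyGetD answers i 0)) : Nat) : Int),
       (((PySem.List.pyRange 0 (answers.length : Int) 1).countP
          (fun i => decide (PySem.List.pyGetD [3,3,1,1,2,2,4,4,5,5] (PySem.Int.mod i 10) 0 = PySem.List.pyGetD answers i 0)) : Nat) : Int)) := by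
  rw [PySem.List.foldl_prod_mk
      (f := fun (a : Int) (i : Int) => if PySem.List.pyGetD [1,2,3,4,5] (PySem.Int.mod i 5) 0 = PySem.List.pyGetD answers i 0 then a + 1 else a)
      (g := fun (s : Int × Int) (i : Int) =>
        (if PySem.List.pyGetD [2,1,2,3,2,4,2,5] (PySem.Int.mod i 8) 0 = PySem.List.pyGetD answers i 0 then s.1 + 1 else s.1,
         if PySem.List.pyGetD [3,3,1,1,2,2,4,4,5,5] (PySem.Int.mod i 10) 0 = PySem.List.pyGetD answers i 0 then s.2 + 1 else s.2)),
      PySem.List.foldl_prod_mk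
      (f := fun (a : Int) (i : Int) => if PySem.List.pyGetD [2,1,2,3,2,4,2,5] (PySem.Int.mod i 8) 0 = PySem.List.pyGetD answers i 0 then a + 1 else a)
      (g := fun (a : Int) (i : Int) => if PySem.List.pyGetD [3,3,1,1,2,2,4,4,5,5] (PySem.Int.mod i 10) 0 = PySem.List.pyGetD answers i 0 then a + 1 else a)]
  rw [PySem.List.foldl_ite_add_one, PySem.List.foldl_ite_add_one, PySem.List.foldl_ite_add_one]
  simp

-- given the three scores, A's max-and-append chain equals B's max-and-comprehension
theorem final_stage (σ1 σ2 σ3 : Int) :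
    (let maxVal := max (max σ1 σ2) σ3
     let answer : List Int := []
     let answer := if σ1 = maxVal then answer ++ [1] else answer
     let answer := if σ2 = maxVal then answer ++ [2] else answer
     let answer := if σ3 = maxVal then answer ++ [3] else answer
     answer)
    = (let scores : List Int := [σ1, σ2, σ3]
       let best := (PySem.List.max? scores (fun y => y)).getD 0
       (PySem.List.enumerate scores 0).foldl
         (fun acc ks => if ks.2 = best then acc ++ [ks.1 + 1] else acc) []) := by
  simp only [PySem.List.max?_id_cons, List.foldl, Option.getD,
    PySem.List.enumerate_cons, PySem.List.enumerate_nil]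
  norm_num

theorem solution_eq (answers : List Int) : solution answers = solution_alt answers := by
  simp only [solution, solution_alt, loopA, List.map,
    scoreB_eq answers [1,2,3,4,5] 5 (by norm_num) (by norm_num) (by norm_num),
    scoreB_eq answers [2,1,2,3,2,4,2,5] 8 (by norm_num) (by norm_num) (by norm_num),
    scoreB_eq answers [3,3,1,1,2,2,4,4,5,5] 10 (by norm_num) (by norm_num) (by norm_num)]
  exact final_stage _ _ _

-- ===== VERDICT =====
theorem solution_spec : Claim_equal_solution := by
  intro answers _
  unfold Spec_solution
  exact solution_eq answers
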